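-- pv_equiv track=rewrite | github.com/andrewkwatts-maker/periodica | tests/test_molecules_complete.py | _geometry_names_match
-- ===== SOURCE A (Python) =====
-- def _geometry_names_match(expected: str, predicted: str) -> bool:
--     """Check if geometry names are equivalent."""
--     expected_lower = expected.lower()
--     predicted_lower = predicted.lower()
--
--     if expected_lower == predicted_lower:
--         return True
--
--     # Define equivalent geometry names
--     equivalents = {
--         'planar hexagonal': ['trigonal planar', 'planar', 'hexagonal'],
--         'chair conformation': ['tetrahedral', 'chair'],
--         'trigonal pyramidal': ['pyramidal'],
--         'bent': ['angular', 'v-shaped'],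
--     }
--
--     for key, matches in equivalents.items():
--         if expected_lower == key and predicted_lower in matches:
--             return True
--         if predicted_lower == key and expected_lower in matches:
--             return True
--         if expected_lower in matches and predicted_lower in matches:
--             return True
--
--     return False
-- ===== SOURCE B (Python) =====
-- _GROUPS = [
--     ['planar hexagonal', 'trigonal planar', 'planar', 'hexagonal'],
--     ['chair conformation', 'tetrahedral', 'chair'],
--     ['trigonal pyramidal', 'pyramidal'],
--     ['bent', 'angular', 'v-shaped'],
-- ]
--
-- # name -> group id, built once over the groups (each group includes its key)
-- _INDEX = {}
-- for _gid, _names in enumerate(_GROUPS):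
--     for _name in _names:
--         _INDEX[_name] = _gid
--
--
-- def _geometry_names_match(expected: str, predicted: str) -> bool:
--     """Check if geometry names are equivalent."""
--     el = expected.lower()
--     pl = predicted.lower()
--     if el == pl:
--         return True
--     ge = _INDEX.get(el)
--     gp = _INDEX.get(pl)
--     return ge is not None and gp is not None and ge == gp
-- ===== Notes on version B (the rewrite author's own statement) =====
-- stated objective: simpler
-- what changed: Replaces the per-call three-condition scan over the synonym dict with a module-level name-to-group-id index built once from explicit equivalence groups (key included in its group), so matching is equal-after-lower or two lookups landing in the same group.
import Mathlib
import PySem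

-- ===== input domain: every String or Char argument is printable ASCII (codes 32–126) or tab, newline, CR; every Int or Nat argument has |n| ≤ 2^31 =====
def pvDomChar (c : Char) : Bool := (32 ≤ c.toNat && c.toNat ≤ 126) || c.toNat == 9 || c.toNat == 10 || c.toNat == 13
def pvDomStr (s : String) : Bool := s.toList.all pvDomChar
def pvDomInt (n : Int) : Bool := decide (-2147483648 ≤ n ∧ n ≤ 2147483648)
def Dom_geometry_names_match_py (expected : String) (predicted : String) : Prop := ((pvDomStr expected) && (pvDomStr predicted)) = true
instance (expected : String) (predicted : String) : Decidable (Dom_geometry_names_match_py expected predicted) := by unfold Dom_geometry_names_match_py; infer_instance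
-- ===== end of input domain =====

-- B replaces A's per-call three-condition scan over the synonym dict by a name→group-id
-- index built once from explicit equivalence groups; matching is then two lookups. Objective: simpler.

-- ===== PORT A =====
-- the 'equivalents' dict literal of A (insertion order)
def pvEquivalents : List (String × List String) :=
  [("planar hexagonal", ["trigonal planar", "planar", "hexagonal"]),
   ("chair conformation", ["tetrahedral", "chair"]),
   ("trigonal pyramidal", ["pyramidal"]),
   ("bent", ["angular", "v-shaped"])]

-- the 'for key, matches in equivalents.items()' loop of A
def geomLoopA (el pl : String) : List (String × List String) → Bool
  | [] => false
  | (key, ms) :: rest =>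
    if el == key && ms.contains pl then true
    else if pl == key && ms.contains el then true
    else if ms.contains el && ms.contains pl then true
    else geomLoopA el pl rest

def geometry_names_match_py (expected : String) (predicted : String) : Bool :=
  let el := PySem.Str.lower expected
  let pl := PySem.Str.lower predicted
  if el == pl then true
  else geomLoopA el pl pvEquivalents

-- ===== PORT B =====
-- B's _GROUPS: explicit equivalence groups, each including its key
def pvGroups : List (List String) :=
  [["planar hexagonal", "trigonal planar", "planar", "hexagonal"],
   ["chair conformation", "tetrahedral", "chair"],
   ["trigonal pyramidal", "pyramidal"],
   ["bent", "angular", "v-shaped"]]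

-- B's _INDEX: built once by the module-level double loop over enumerate(_GROUPS)
def pvIndex : PySem.Dict String Int :=
  (PySem.List.enumerate pvGroups).foldl
    (fun d gn => gn.2.foldl (fun d name => d.insert name gn.1) d)
    PySem.Dict.empty

def geometry_names_match_py_alt (expected : String) (predicted : String) : Bool :=
  let el := PySem.Str.lower expected
  let pl := PySem.Str.lower predicted
  if el == pl then true
  else
    match pvIndex.get? el, pvIndex.get? pl with
    | some ge, some gp => ge == gp
    | _, _ => false

-- ===== PRECONDITION & SPEC =====
def Spec_geometry_names_match_py (expected : String) (predicted : String) (out : Bool) : Prop := out = geometry_names_match_py_alt expected predicted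
instance (expected : String) (predicted : String) (out : Bool) : Decidable (Spec_geometry_names_match_py expected predicted out) := by unfold Spec_geometry_names_match_py; infer_instance

-- ===== CLAIM (what is proved, stated in full; the proofs are below) =====
def Claim_equal_geometry_names_match_py : Prop := ∀ (expected : String) (predicted : String), Dom_geometry_names_match_py expected predicted → Spec_geometry_names_match_py expected predicted (geometry_names_match_py expected predicted)

-- ===== LEMMAS AND PROOFS =====

-- the built index, as a literal dict (proof-only normal form)
theorem pvIndex_eq : pvIndex = PySem.Dict.mk [("planar hexagonal", 0), ("trigonal planar", 0), ("planar", 0), ("hexagonal", 0), ("chair conformation", 1), ("tetrahedral", 1), ("chair", 1), ("trigonal pyramidal", 2), ("pyramidal", 2), ("bent", 3), ("angular", 3), ("v-shaped", 3)] := by decide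

-- core: for any (already lowered) pair of strings, A's scan and B's index lookup agree
theorem geom_core (el pl : String) :
    (if el == pl then true else geomLoopA el pl pvEquivalents) =
    (if el == pl then true
     else match pvIndex.get? el, pvIndex.get? pl with
          | some ge, some gp => ge == gp
          | _, _ => false) := by
  by_cases hep : el = pl
  · simp [hep]
  by_cases h0 : el = "planar hexagonal"
  · subst h0
    by_cases p0 : pl = "planar hexagonal"
    · exact absurd p0.symm hep
    by_cases p1 : pl = "trigonal planar"
    · subst p1; decide
    by_cases p2 : pl = "planar"
    · subst p2; decide
    by_cases p3 : pl = "hexagonal"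
    · subst p3; decide
    by_cases p4 : pl = "chair conformation"
    · subst p4; decide
    by_cases p5 : pl = "tetrahedral"
    · subst p5; decide
    by_cases p6 : pl = "chair"
    · subst p6; decide
    by_cases p7 : pl = "trigonal pyramidal"
    · subst p7; decide
    by_cases p8 : pl = "pyramidal"
    · subst p8; decide
    by_cases p9 : pl = "bent"
    · subst p9; decide
    by_cases p10 : pl = "angular"
    · subst p10; decide
    by_cases p11 : pl = "v-shaped"
    · subst p11; decide
    simp [geomLoopA, pvEquivalents, pvIndex_eq, PySem.Dict.get?, Ne.symm p0, p1, Ne.symm p1, p2, Ne.symm p2, p3, Ne.symm p3, Ne.symm p4, p5, Ne.symm p5, p6, Ne.symm p6, Ne.symm p7, p8, Ne.symm p8, Ne.symm p9, p10, Ne.symm p10, p11, Ne.symm p11]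
  by_cases h1 : el = "trigonal planar"
  · subst h1
    by_cases p0 : pl = "planar hexagonal"
    · subst p0; decide
    by_cases p1 : pl = "trigonal planar"
    · exact absurd p1.symm hep
    by_cases p2 : pl = "planar"
    · subst p2; decide
    by_cases p3 : pl = "hexagonal"
    · subst p3; decide
    by_cases p4 : pl = "chair conformation"
    · subst p4; decide
    by_cases p5 : pl = "tetrahedral"
    · subst p5; decide
    by_cases p6 : pl = "chair"
    · subst p6; decide
    by_cases p7 : pl = "trigonal pyramidal"
    · subst p7; decide
    by_cases p8 : pl = "pyramidal"
    · subst p8; decide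
    by_cases p9 : pl = "bent"
    · subst p9; decide
    by_cases p10 : pl = "angular"
    · subst p10; decide
    by_cases p11 : pl = "v-shaped"
    · subst p11; decide
    simp [geomLoopA, pvEquivalents, pvIndex_eq, PySem.Dict.get?, p0, Ne.symm p0, p1, Ne.symm p1, p2, Ne.symm p2, p3, Ne.symm p3, Ne.symm p4, p5, Ne.symm p5, p6, Ne.symm p6, Ne.symm p7, p8, Ne.symm p8, Ne.symm p9, p10, Ne.symm p10, p11, Ne.symm p11]
  by_cases h2 : el = "planar"
  · subst h2
    by_cases p0 : pl = "planar hexagonal"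
    · subst p0; decide
    by_cases p1 : pl = "trigonal planar"
    · subst p1; decide
    by_cases p2 : pl = "planar"
    · exact absurd p2.symm hep
    by_cases p3 : pl = "hexagonal"
    · subst p3; decide
    by_cases p4 : pl = "chair conformation"
    · subst p4; decide
    by_cases p5 : pl = "tetrahedral"
    · subst p5; decide
    by_cases p6 : pl = "chair"
    · subst p6; decide
    by_cases p7 : pl = "trigonal pyramidal"
    · subst p7; decide
    by_cases p8 : pl = "pyramidal"
    · subst p8; decide
    by_cases p9 : pl = "bent"
    · subst p9; decide
    by_cases p10 : pl = "angular"
    · subst p10; decide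
    by_cases p11 : pl = "v-shaped"
    · subst p11; decide
    simp [geomLoopA, pvEquivalents, pvIndex_eq, PySem.Dict.get?, p0, Ne.symm p0, p1, Ne.symm p1, p2, Ne.symm p2, p3, Ne.symm p3, Ne.symm p4, p5, Ne.symm p5, p6, Ne.symm p6, Ne.symm p7, p8, Ne.symm p8, Ne.symm p9, p10, Ne.symm p10, p11, Ne.symm p11]
  by_cases h3 : el = "hexagonal"
  · subst h3
    by_cases p0 : pl = "planar hexagonal"
    · subst p0; decide
    by_cases p1 : pl = "trigonal planar"
    · subst p1; decide
    by_cases p2 : pl = "planar"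
    · subst p2; decide
    by_cases p3 : pl = "hexagonal"
    · exact absurd p3.symm hep
    by_cases p4 : pl = "chair conformation"
    · subst p4; decide
    by_cases p5 : pl = "tetrahedral"
    · subst p5; decide
    by_cases p6 : pl = "chair"
    · subst p6; decide
    by_cases p7 : pl = "trigonal pyramidal"
    · subst p7; decide
    by_cases p8 : pl = "pyramidal"
    · subst p8; decide
    by_cases p9 : pl = "bent"
    · subst p9; decide
    by_cases p10 : pl = "angular"
    · subst p10; decide
    by_cases p11 : pl = "v-shaped"
    · subst p11; decide
    simp [geomLoopA, pvEquivalents, pvIndex_eq, PySem.Dict.get?, p0, Ne.symm p0, p1, Ne.symm p1, p2, Ne.symm p2, p3, Ne.symm p3, Ne.symm p4, p5, Ne.symm p5, p6, Ne.symm p6, Ne.symm p7, p8, Ne.symm p8, Ne.symm p9, p10, Ne.symm p10, p11, Ne.symm p11]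
  by_cases h4 : el = "chair conformation"
  · subst h4
    by_cases p0 : pl = "planar hexagonal"
    · subst p0; decide
    by_cases p1 : pl = "trigonal planar"
    · subst p1; decide
    by_cases p2 : pl = "planar"
    · subst p2; decide
    by_cases p3 : pl = "hexagonal"
    · subst p3; decide
    by_cases p4 : pl = "chair conformation"
    · exact absurd p4.symm hep
    by_cases p5 : pl = "tetrahedral"
    · subst p5; decide
    by_cases p6 : pl = "chair"
    · subst p6; decide
    by_cases p7 : pl = "trigonal pyramidal"
    · subst p7; decide
    by_cases p8 : pl = "pyramidal"
    · subst p8; decide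
    by_cases p9 : pl = "bent"
    · subst p9; decide
    by_cases p10 : pl = "angular"
    · subst p10; decide
    by_cases p11 : pl = "v-shaped"
    · subst p11; decide
    simp [geomLoopA, pvEquivalents, pvIndex_eq, PySem.Dict.get?, Ne.symm p0, p1, Ne.symm p1, p2, Ne.symm p2, p3, Ne.symm p3, Ne.symm p4, p5, Ne.symm p5, p6, Ne.symm p6, Ne.symm p7, p8, Ne.symm p8, Ne.symm p9, p10, Ne.symm p10, p11, Ne.symm p11]
  by_cases h5 : el = "tetrahedral"
  · subst h5
    by_cases p0 : pl = "planar hexagonal"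
    · subst p0; decide
    by_cases p1 : pl = "trigonal planar"
    · subst p1; decide
    by_cases p2 : pl = "planar"
    · subst p2; decide
    by_cases p3 : pl = "hexagonal"
    · subst p3; decide
    by_cases p4 : pl = "chair conformation"
    · subst p4; decide
    by_cases p5 : pl = "tetrahedral"
    · exact absurd p5.symm hep
    by_cases p6 : pl = "chair"
    · subst p6; decide
    by_cases p7 : pl = "trigonal pyramidal"
    · subst p7; decide
    by_cases p8 : pl = "pyramidal"
    · subst p8; decide
    by_cases p9 : pl = "bent"
    · subst p9; decide
    by_cases p10 : pl = "angular"
    · subst p10; decide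
    by_cases p11 : pl = "v-shaped"
    · subst p11; decide
    simp [geomLoopA, pvEquivalents, pvIndex_eq, PySem.Dict.get?, Ne.symm p0, p1, Ne.symm p1, p2, Ne.symm p2, p3, Ne.symm p3, p4, Ne.symm p4, p5, Ne.symm p5, p6, Ne.symm p6, Ne.symm p7, p8, Ne.symm p8, Ne.symm p9, p10, Ne.symm p10, p11, Ne.symm p11]
  by_cases h6 : el = "chair"
  · subst h6
    by_cases p0 : pl = "planar hexagonal"
    · subst p0; decide
    by_cases p1 : pl = "trigonal planar"
    · subst p1; decide
    by_cases p2 : pl = "planar"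
    · subst p2; decide
    by_cases p3 : pl = "hexagonal"
    · subst p3; decide
    by_cases p4 : pl = "chair conformation"
    · subst p4; decide
    by_cases p5 : pl = "tetrahedral"
    · subst p5; decide
    by_cases p6 : pl = "chair"
    · exact absurd p6.symm hep
    by_cases p7 : pl = "trigonal pyramidal"
    · subst p7; decide
    by_cases p8 : pl = "pyramidal"
    · subst p8; decide
    by_cases p9 : pl = "bent"
    · subst p9; decide
    by_cases p10 : pl = "angular"
    · subst p10; decide
    by_cases p11 : pl = "v-shaped"
    · subst p11; decide
    simp [geomLoopA, pvEquivalents, pvIndex_eq, PySem.Dict.get?, Ne.symm p0, p1, Ne.symm p1, p2, Ne.symm p2, p3, Ne.symm p3, p4, Ne.symm p4, p5, Ne.symm p5, p6, Ne.symm p6, Ne.symm p7, p8, Ne.symm p8, Ne.symm p9, p10, Ne.symm p10, p11, Ne.symm p11]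
  by_cases h7 : el = "trigonal pyramidal"
  · subst h7
    by_cases p0 : pl = "planar hexagonal"
    · subst p0; decide
    by_cases p1 : pl = "trigonal planar"
    · subst p1; decide
    by_cases p2 : pl = "planar"
    · subst p2; decide
    by_cases p3 : pl = "hexagonal"
    · subst p3; decide
    by_cases p4 : pl = "chair conformation"
    · subst p4; decide
    by_cases p5 : pl = "tetrahedral"
    · subst p5; decide
    by_cases p6 : pl = "chair"
    · subst p6; decide
    by_cases p7 : pl = "trigonal pyramidal"
    · exact absurd p7.symm hep
    by_cases p8 : pl = "pyramidal"
    · subst p8; decide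
    by_cases p9 : pl = "bent"
    · subst p9; decide
    by_cases p10 : pl = "angular"
    · subst p10; decide
    by_cases p11 : pl = "v-shaped"
    · subst p11; decide
    simp [geomLoopA, pvEquivalents, pvIndex_eq, PySem.Dict.get?, Ne.symm p0, p1, Ne.symm p1, p2, Ne.symm p2, p3, Ne.symm p3, Ne.symm p4, p5, Ne.symm p5, p6, Ne.symm p6, Ne.symm p7, p8, Ne.symm p8, Ne.symm p9, p10, Ne.symm p10, p11, Ne.symm p11]
  by_cases h8 : el = "pyramidal"
  · subst h8
    by_cases p0 : pl = "planar hexagonal"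
    · subst p0; decide
    by_cases p1 : pl = "trigonal planar"
    · subst p1; decide
    by_cases p2 : pl = "planar"
    · subst p2; decide
    by_cases p3 : pl = "hexagonal"
    · subst p3; decide
    by_cases p4 : pl = "chair conformation"
    · subst p4; decide
    by_cases p5 : pl = "tetrahedral"
    · subst p5; decide
    by_cases p6 : pl = "chair"
    · subst p6; decide
    by_cases p7 : pl = "trigonal pyramidal"
    · subst p7; decide
    by_cases p8 : pl = "pyramidal"
    · exact absurd p8.symm hep
    by_cases p9 : pl = "bent"
    · subst p9; decide
    by_cases p10 : pl = "angular"
    · subst p10; decide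
    by_cases p11 : pl = "v-shaped"
    · subst p11; decide
    simp [geomLoopA, pvEquivalents, pvIndex_eq, PySem.Dict.get?, Ne.symm p0, p1, Ne.symm p1, p2, Ne.symm p2, p3, Ne.symm p3, Ne.symm p4, p5, Ne.symm p5, p6, Ne.symm p6, p7, Ne.symm p7, p8, Ne.symm p8, Ne.symm p9, p10, Ne.symm p10, p11, Ne.symm p11]
  by_cases h9 : el = "bent"
  · subst h9
    by_cases p0 : pl = "planar hexagonal"
    · subst p0; decide
    by_cases p1 : pl = "trigonal planar"
    · subst p1; decide
    by_cases p2 : pl = "planar"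
    · subst p2; decide
    by_cases p3 : pl = "hexagonal"
    · subst p3; decide
    by_cases p4 : pl = "chair conformation"
    · subst p4; decide
    by_cases p5 : pl = "tetrahedral"
    · subst p5; decide
    by_cases p6 : pl = "chair"
    · subst p6; decide
    by_cases p7 : pl = "trigonal pyramidal"
    · subst p7; decide
    by_cases p8 : pl = "pyramidal"
    · subst p8; decide
    by_cases p9 : pl = "bent"
    · exact absurd p9.symm hep
    by_cases p10 : pl = "angular"
    · subst p10; decide
    by_cases p11 : pl = "v-shaped"
    · subst p11; decide
    simp [geomLoopA, pvEquivalents, pvIndex_eq, PySem.Dict.get?, Ne.symm p0, p1, Ne.symm p1, p2, Ne.symm p2, p3, Ne.symm p3, Ne.symm p4, p5, Ne.symm p5, p6, Ne.symm p6, Ne.symm p7, p8, Ne.symm p8, Ne.symm p9, p10, Ne.symm p10, p11, Ne.symm p11]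
  by_cases h10 : el = "angular"
  · subst h10
    by_cases p0 : pl = "planar hexagonal"
    · subst p0; decide
    by_cases p1 : pl = "trigonal planar"
    · subst p1; decide
    by_cases p2 : pl = "planar"
    · subst p2; decide
    by_cases p3 : pl = "hexagonal"
    · subst p3; decide
    by_cases p4 : pl = "chair conformation"
    · subst p4; decide
    by_cases p5 : pl = "tetrahedral"
    · subst p5; decide
    by_cases p6 : pl = "chair"
    · subst p6; decide
    by_cases p7 : pl = "trigonal pyramidal"
    · subst p7; decide
    by_cases p8 : pl = "pyramidal"
    · subst p8; decide
    by_cases p9 : pl = "bent"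
    · subst p9; decide
    by_cases p10 : pl = "angular"
    · exact absurd p10.symm hep
    by_cases p11 : pl = "v-shaped"
    · subst p11; decide
    simp [geomLoopA, pvEquivalents, pvIndex_eq, PySem.Dict.get?, Ne.symm p0, p1, Ne.symm p1, p2, Ne.symm p2, p3, Ne.symm p3, Ne.symm p4, p5, Ne.symm p5, p6, Ne.symm p6, Ne.symm p7, p8, Ne.symm p8, p9, Ne.symm p9, p10, Ne.symm p10, p11, Ne.symm p11]
  by_cases h11 : el = "v-shaped"
  · subst h11
    by_cases p0 : pl = "planar hexagonal"
    · subst p0; decide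
    by_cases p1 : pl = "trigonal planar"
    · subst p1; decide
    by_cases p2 : pl = "planar"
    · subst p2; decide
    by_cases p3 : pl = "hexagonal"
    · subst p3; decide
    by_cases p4 : pl = "chair conformation"
    · subst p4; decide
    by_cases p5 : pl = "tetrahedral"
    · subst p5; decide
    by_cases p6 : pl = "chair"
    · subst p6; decide
    by_cases p7 : pl = "trigonal pyramidal"
    · subst p7; decide
    by_cases p8 : pl = "pyramidal"
    · subst p8; decide
    by_cases p9 : pl = "bent"
    · subst p9; decide
    by_cases p10 : pl = "angular"
    · subst p10; decide
    by_cases p11 : pl = "v-shaped"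
    · exact absurd p11.symm hep
    simp [geomLoopA, pvEquivalents, pvIndex_eq, PySem.Dict.get?, Ne.symm p0, p1, Ne.symm p1, p2, Ne.symm p2, p3, Ne.symm p3, Ne.symm p4, p5, Ne.symm p5, p6, Ne.symm p6, Ne.symm p7, p8, Ne.symm p8, p9, Ne.symm p9, p10, Ne.symm p10, p11, Ne.symm p11]
  simp [hep, geomLoopA, pvEquivalents, pvIndex_eq, PySem.Dict.get?, h0, Ne.symm h0, h1, Ne.symm h1, h2, Ne.symm h2, h3, Ne.symm h3, h4, Ne.symm h4, h5, Ne.symm h5, h6, Ne.symm h6, h7, Ne.symm h7, h8, Ne.symm h8, h9, Ne.symm h9, h10, Ne.symm h10, h11, Ne.symm h11]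


-- ===== VERDICT (by name: the statement is the Claim_ definition above) =====
theorem geometry_names_match_py_spec : Claim_equal_geometry_names_match_py := by
  intro expected predicted _
  show geometry_names_match_py expected predicted = geometry_names_match_py_alt expected predicted
  unfold geometry_names_match_py geometry_names_match_py_alt
  exact geom_core (PySem.Str.lower expected) (PySem.Str.lower predicted)
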